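-- pv_equiv track=rewrite | github.com/Skydecap/Multimodal-Autonomous-Web-Systems-Repair-through-Feedback | utils/patch_engine.py | _find_block_in_lines
-- ===== SOURCE A (Python) =====
-- def _find_block_in_lines(lines: list[str], block: list[str], start_from: int = 0) -> int:
--     """
--     Find a consecutive block of lines in the file.
--     Matches by stripped content. Returns the index of the first matching line, or -1.
--     """
--     if not block:
--         return -1
--     block_stripped = [b.strip() for b in block]
--     for i in range(start_from, len(lines) - len(block) + 1):
--         if all(lines[i + j].strip() == block_stripped[j] for j in range(len(block))):
--             return i
--     return -1
-- ===== SOURCE B (Python) =====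
-- def _find_block_in_lines(lines: list[str], block: list[str], start_from: int = 0) -> int:
--     """
--     Find a consecutive block of lines in the file.
--     Matches by stripped content. Returns the index of the first matching line, or -1.
--     Builds an inverted index (stripped line -> positions) once, seeds the candidate
--     set from the block's first line, then refines it column by column; the answer is
--     the smallest surviving candidate.
--     """
--     if not block:
--         return -1
--     target = [b.strip() for b in block]
--     stripped = [ln.strip() for ln in lines]
--     m = len(target)
--     positions = {}
--     for i, s in enumerate(stripped):
--         positions.setdefault(s, []).append(i)
--     cand = [i for i in positions.get(target[0], [])
--             if i >= start_from and i + m <= len(stripped)]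
--     for j in range(1, m):
--         cand = [i for i in cand if stripped[i + j] == target[j]]
--         if not cand:
--             return -1
--     return cand[0] if cand else -1
-- ===== Notes on version B (the rewrite author's own statement) =====
-- stated objective: alternative
-- what changed: B replaces A's sliding-window scan (for each position, re-strip and compare the whole block) by an inverted index from stripped line to its positions built once, a candidate list seeded from the block's first line, and column-by-column refinement of the candidates; the answer is the smallest survivor instead of the first window hit.
-- outside the precondition, e.g. on _find_block_in_lines(['a'], ['a'], -1): A returns -1, B returns 0; on _find_block_in_lines(['a', 'b'], ['b'], -2): A returns -1, B returns 1
import Mathlib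
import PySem

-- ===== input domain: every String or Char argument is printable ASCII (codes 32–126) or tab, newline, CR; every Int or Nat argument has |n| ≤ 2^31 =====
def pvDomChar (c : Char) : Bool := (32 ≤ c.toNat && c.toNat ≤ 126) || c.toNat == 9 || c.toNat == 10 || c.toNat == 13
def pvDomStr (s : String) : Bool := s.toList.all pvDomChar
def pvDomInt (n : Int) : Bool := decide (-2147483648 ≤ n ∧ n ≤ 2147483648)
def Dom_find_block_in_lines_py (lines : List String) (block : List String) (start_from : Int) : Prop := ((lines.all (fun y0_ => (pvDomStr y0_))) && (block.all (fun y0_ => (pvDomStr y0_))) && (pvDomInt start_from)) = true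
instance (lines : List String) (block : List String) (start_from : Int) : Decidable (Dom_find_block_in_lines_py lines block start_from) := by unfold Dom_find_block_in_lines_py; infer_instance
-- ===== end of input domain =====

-- B replaces A's sliding-window scan by an inverted index (stripped line -> positions)
-- built once, a candidate list seeded from the block's first line refined column by
-- column; the answer is the smallest survivor (alternative algorithm, not claimed faster).


-- ===== PORT A =====
-- all(lines[i + j].strip() == block_stripped[j] for j in range(len(block)))
-- (an out-of-range lines[i+j] is `none` here, where Python raises — excluded by Pre_)
def pvCheckA (lines : List String) (bs : List String) (i : Int) : Bool :=
  (List.range bs.length).all (fun j =>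
    ((PySem.List.pyGet? lines (i + (j : Int))).map PySem.Str.strip) == bs[j]?)

-- the for-loop over range(start_from, len(lines) - len(block) + 1) with early return
def pvLoopA (lines : List String) (bs : List String) : List Int → Int
  | [] => -1
  | i :: rest => if pvCheckA lines bs i then i else pvLoopA lines bs rest

def find_block_in_lines_py (lines : List String) (block : List String) (start_from : Int) : Int :=
  if block = [] then -1
  else
    pvLoopA lines (block.map PySem.Str.strip)
      (PySem.List.pyRange start_from ((lines.length : Int) - (block.length : Int) + 1) 1)

-- ===== PORT B =====
-- for i, s in enumerate(stripped): positions.setdefault(s, []).append(i)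
def pvPositions (stripped : List String) : PySem.Dict String (List Int) :=
  (PySem.List.enumerate stripped).foldl
    (fun d p => d.modify p.2 [] (fun l => l ++ [p.1])) PySem.Dict.empty

-- cand = [i for i in positions.get(target[0], []) if i >= start_from and i + m <= len(stripped)]
def pvCand0 (stripped : List String) (target : List String) (start_from : Int) : List Int :=
  ((pvPositions stripped).getD (PySem.List.pyGetD target 0 "") []).filter
    (fun i => decide (start_from ≤ i) &&
              decide (i + (target.length : Int) ≤ (stripped.length : Int)))

-- for j in range(1, m): cand = [i for i in cand if stripped[i+j] == target[j]]; if not cand: return -1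
-- (indices i+j are always in range on the reachable candidates, so pyGetD is exact)
def pvRefine (stripped target : List String) : List Int → List Int → List Int
  | [], cand => cand
  | j :: rest, cand =>
    let c := cand.filter (fun i =>
      PySem.List.pyGetD stripped (i + j) "" == PySem.List.pyGetD target j "")
    if c = [] then [] else pvRefine stripped target rest c

def find_block_in_lines_py_alt (lines : List String) (block : List String) (start_from : Int) : Int :=
  if block = [] then -1
  else
    let target := block.map PySem.Str.strip
    let stripped := lines.map PySem.Str.strip
    match pvRefine stripped target (PySem.List.pyRange 1 (target.length : Int) 1)
        (pvCand0 stripped target start_from) with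
    | [] => -1
    | i :: _ => i

-- ===== PRECONDITION & SPEC =====
-- Pre_ excludes exactly the inputs on which A evaluates a negative index lines[i+j]
-- (nonempty block, start_from < 0, nonempty range): there A raises IndexError or scans
-- accidental wrapped-around windows, a value B need not match.
def Pre_find_block_in_lines_py (lines : List String) (block : List String) (start_from : Int) : Prop :=
  block = [] ∨ 0 ≤ start_from ∨ (lines.length : Int) - (block.length : Int) + 1 ≤ start_from
instance (lines : List String) (block : List String) (start_from : Int) : Decidable (Pre_find_block_in_lines_py lines block start_from) := by unfold Pre_find_block_in_lines_py; infer_instance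

def pvWitness_find_block_in_lines_py : List String × List String × Int :=
  (["x", " a", "b ", "a"], ["a", "b"], 0)

def Spec_find_block_in_lines_py (lines : List String) (block : List String) (start_from : Int) (out : Int) : Prop := out = find_block_in_lines_py_alt lines block start_from
instance (lines : List String) (block : List String) (start_from : Int) (out : Int) : Decidable (Spec_find_block_in_lines_py lines block start_from out) := by unfold Spec_find_block_in_lines_py; infer_instance

-- ===== CLAIM (what is proved, stated in full; the proofs are below) =====
def Claim_equal_find_block_in_lines_py : Prop := ∀ (lines : List String) (block : List String) (start_from : Int), Dom_find_block_in_lines_py lines block start_from → Pre_find_block_in_lines_py lines block start_from → Spec_find_block_in_lines_py lines block start_from (find_block_in_lines_py lines block start_from)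

-- ===== LEMMAS AND PROOFS =====

-- the set of positions that match the whole block: both programs return its least element
def pvOk (stripped bs : List String) (start i : Int) : Prop :=
  start ≤ i ∧ 0 ≤ i ∧ i + (bs.length : Int) ≤ (stripped.length : Int) ∧
    ∀ j : Nat, j < bs.length → stripped[i.toNat + j]? = bs[j]?

lemma pv_mem_enum {α : Type} (xs : List α) (s : Int) (p : Int × α) :
    p ∈ PySem.List.enumerate xs s ↔ ∃ k : Nat, p.1 = s + k ∧ xs[k]? = some p.2 := by
  induction xs generalizing s with
  | nil => simp [PySem.List.enumerate]
  | cons x xs ih =>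
    rw [PySem.List.enumerate_cons]
    simp only [List.mem_cons, ih]
    constructor
    · rintro (rfl | ⟨k, hk, hg⟩)
      · exact ⟨0, by simp⟩
      · exact ⟨k + 1, by push_cast at hk ⊢; omega, by simpa using hg⟩
    · rintro ⟨k, hk, hg⟩
      cases k with
      | zero =>
        left
        simp at hg hk
        obtain ⟨a, b⟩ := p
        simp_all
      | succ k =>
        right
        exact ⟨k, by push_cast at hk ⊢; omega, by simpa using hg⟩

lemma pv_candIdx_eq (stripped : List String) (t0 : String) :
    (pvPositions stripped).getD t0 [] =
      ((PySem.List.enumerate stripped).filter (fun p => p.2 == t0)).map (·.1) := by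
  unfold pvPositions
  have h : (PySem.List.enumerate stripped).foldl
      (fun d p => d.modify p.2 [] (fun l => l ++ [p.1])) PySem.Dict.empty
      = ((PySem.List.enumerate stripped).map Prod.swap).foldl
        (fun d p => d.modify p.1 [] (fun l => l ++ [p.2])) PySem.Dict.empty := by
    rw [List.foldl_map]
    rfl
  rw [h, PySem.Dict.getD_foldl_modify_append]
  simp [List.filter_map, Function.comp_def]

lemma pv_mem_cand0 (stripped bs : List String) (start i : Int) :
    i ∈ pvCand0 stripped bs start ↔
      (∃ k : Nat, i = (k : Int) ∧ stripped[k]? = some (PySem.List.pyGetD bs 0 "")) ∧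
        start ≤ i ∧ i + (bs.length : Int) ≤ (stripped.length : Int) := by
  unfold pvCand0
  rw [List.mem_filter, pv_candIdx_eq]
  simp only [List.mem_map, List.mem_filter, Bool.and_eq_true, decide_eq_true_eq, beq_iff_eq]
  constructor
  · rintro ⟨⟨p, ⟨hp, hval⟩, rfl⟩, h1, h2⟩
    obtain ⟨k, hk, hg⟩ := (pv_mem_enum stripped 0 p).mp hp
    exact ⟨⟨k, by omega, by rw [hg, hval]⟩, h1, h2⟩
  · rintro ⟨⟨k, rfl, hg⟩, h1, h2⟩
    refine ⟨⟨((k : Int), PySem.List.pyGetD bs 0 ""), ⟨?_, rfl⟩, rfl⟩, h1, h2⟩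
    exact (pv_mem_enum stripped 0 _).mpr ⟨k, by omega, hg⟩

lemma pv_mem_refine (stripped bs : List String) (js : List Int) (cand : List Int) (i : Int) :
    i ∈ pvRefine stripped bs js cand ↔
      i ∈ cand ∧ ∀ j ∈ js,
        (PySem.List.pyGetD stripped (i + j) "" == PySem.List.pyGetD bs j "") = true := by
  induction js generalizing cand with
  | nil => simp [pvRefine]
  | cons j rest ih =>
    unfold pvRefine
    dsimp only
    split
    · rename_i hc
      simp only [List.not_mem_nil, false_iff]
      rintro ⟨hm, hall⟩
      have : i ∈ cand.filter (fun i =>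
          PySem.List.pyGetD stripped (i + j) "" == PySem.List.pyGetD bs j "") :=
        List.mem_filter.mpr ⟨hm, hall j (by simp)⟩
      simp [hc] at this
    · rw [ih]
      simp only [List.mem_filter, List.mem_cons]
      constructor
      · rintro ⟨⟨hm, hj⟩, hrest⟩
        exact ⟨hm, by rintro j' (rfl | hj'); exact hj; exact hrest j' hj'⟩
      · rintro ⟨hm, hall⟩
        exact ⟨⟨hm, hall j (Or.inl rfl)⟩, fun j' hj' => hall j' (Or.inr hj')⟩

lemma pv_refine_sublist (stripped bs : List String) (js : List Int) (cand : List Int) :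
    List.Sublist (pvRefine stripped bs js cand) cand := by
  induction js generalizing cand with
  | nil => exact List.Sublist.refl _
  | cons j rest ih =>
    unfold pvRefine
    dsimp only
    split
    · exact List.nil_sublist _
    · exact (ih _).trans List.filter_sublist

lemma pv_pairwise_enum (stripped : List String) :
    (PySem.List.enumerate stripped 0).Pairwise (fun p q => p.1 < q.1) := by
  have := PySem.List.pairwise_lt_pyRange_one 0 (0 + (stripped.length : Int))
  rw [← PySem.List.map_fst_enumerate stripped 0] at this
  exact List.pairwise_map.mp this

lemma pv_pairwise_cand0 (stripped bs : List String) (start : Int) :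
    (pvCand0 stripped bs start).Pairwise (· < ·) := by
  unfold pvCand0
  apply List.Pairwise.filter
  rw [pv_candIdx_eq, List.pairwise_map]
  exact List.Pairwise.filter _ (pv_pairwise_enum stripped)

lemma pv_memB_iff (stripped bs : List String) (start i : Int) (hbs : bs ≠ []) :
    i ∈ pvRefine stripped bs (PySem.List.pyRange 1 (bs.length : Int) 1)
        (pvCand0 stripped bs start) ↔ pvOk stripped bs start i := by
  have hlen0 : 0 < bs.length := List.length_pos_iff.mpr hbs
  rw [pv_mem_refine, pv_mem_cand0]
  unfold pvOk
  constructor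
  · rintro ⟨⟨⟨k, rfl, hg⟩, h1, h2⟩, hall⟩
    refine ⟨h1, by omega, h2, ?_⟩
    intro j hj
    rw [Int.toNat_natCast]
    cases j with
    | zero =>
      rw [Nat.add_zero, hg, List.getElem?_eq_getElem hlen0]
      rw [PySem.List.pyGetD_zero, List.getD_eq_getElem bs "" hlen0]
    | succ j' =>
      have hmem : ((j' + 1 : Nat) : Int) ∈ PySem.List.pyRange 1 (bs.length : Int) 1 :=
        PySem.List.mem_pyRange_one.mpr ⟨by omega, by omega⟩
      have hc := hall _ hmem
      have hcast : (k : Int) + ((j' + 1 : Nat) : Int) = ((k + (j' + 1) : Nat) : Int) := by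
        push_cast; ring
      rw [hcast, PySem.List.pyGetD_natCast, PySem.List.pyGetD_natCast, beq_iff_eq] at hc
      have hk : k + (j' + 1) < stripped.length := by omega
      rw [List.getD_eq_getElem stripped "" hk, List.getD_eq_getElem bs "" hj] at hc
      rw [List.getElem?_eq_getElem hk, List.getElem?_eq_getElem hj, hc]
  · rintro ⟨h1, h0, h2, hall⟩
    obtain ⟨k, rfl⟩ : ∃ k : Nat, i = (k : Int) := ⟨i.toNat, by omega⟩
    have hall' : ∀ j : Nat, j < bs.length → stripped[k + j]? = bs[j]? := by
      intro j hj
      have := hall j hj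
      rwa [Int.toNat_natCast] at this
    constructor
    · refine ⟨⟨k, rfl, ?_⟩, h1, h2⟩
      have := hall' 0 hlen0
      rw [Nat.add_zero, List.getElem?_eq_getElem hlen0] at this
      rw [this, PySem.List.pyGetD_zero, List.getD_eq_getElem bs "" hlen0]
    · intro j hjm
      obtain ⟨hj1, hj2⟩ := PySem.List.mem_pyRange_one.mp hjm
      obtain ⟨j', rfl⟩ : ∃ j' : Nat, j = (j' : Int) := ⟨j.toNat, by omega⟩
      have hj'm : j' < bs.length := by omega
      have := hall' j' hj'm
      have hk : k + j' < stripped.length := by omega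
      rw [List.getElem?_eq_getElem hk, List.getElem?_eq_getElem hj'm,
        Option.some_inj] at this
      have hcast : (k : Int) + (j' : Int) = ((k + j' : Nat) : Int) := by push_cast; ring
      rw [hcast, PySem.List.pyGetD_natCast, PySem.List.pyGetD_natCast, beq_iff_eq]
      rw [List.getD_eq_getElem stripped "" hk, List.getD_eq_getElem bs "" hj'm]
      exact this

lemma pv_checkA_iff (lines bs : List String) (k : Nat) :
    pvCheckA lines bs (k : Int) = true ↔
      ∀ j : Nat, j < bs.length → (lines.map PySem.Str.strip)[k + j]? = bs[j]? := by
  unfold pvCheckA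
  simp only [List.all_eq_true, List.mem_range, beq_iff_eq]
  apply forall_congr'
  intro j
  apply imp_congr Iff.rfl
  have hcast : (k : Int) + (j : Int) = ((k + j : Nat) : Int) := by push_cast; ring
  rw [hcast, PySem.List.pyGet?_natCast, List.getElem?_map]

lemma pv_memA_iff (lines bs : List String) (start i : Int) (hs : 0 ≤ start) :
    i ∈ (PySem.List.pyRange start ((lines.length : Int) - (bs.length : Int) + 1) 1).filter
        (pvCheckA lines bs) ↔ pvOk (lines.map PySem.Str.strip) bs start i := by
  rw [List.mem_filter, PySem.List.mem_pyRange_one]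
  unfold pvOk
  have hlenS : (lines.map PySem.Str.strip).length = lines.length := List.length_map _
  constructor
  · rintro ⟨⟨h1, h2⟩, hc⟩
    have h0 : 0 ≤ i := le_trans hs h1
    obtain ⟨k, rfl⟩ : ∃ k : Nat, i = (k : Int) := ⟨i.toNat, by omega⟩
    refine ⟨h1, h0, by omega, ?_⟩
    intro j hj
    rw [Int.toNat_natCast]
    exact (pv_checkA_iff lines bs k).mp hc j hj
  · rintro ⟨h1, h0, h2, hall⟩
    obtain ⟨k, rfl⟩ : ∃ k : Nat, i = (k : Int) := ⟨i.toNat, by omega⟩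
    rw [hlenS] at h2
    refine ⟨⟨h1, by omega⟩, (pv_checkA_iff lines bs k).mpr ?_⟩
    intro j hj
    have := hall j hj
    rwa [Int.toNat_natCast] at this

lemma pv_loopA_eq_headD (lines bs : List String) (r : List Int) :
    pvLoopA lines bs r = ((r.filter (pvCheckA lines bs)).headD (-1)) := by
  induction r with
  | nil => rfl
  | cons i rest ih =>
    unfold pvLoopA
    rw [List.filter_cons]
    by_cases h : pvCheckA lines bs i <;> simp [h, ih]

-- ===== VERDICT (by name: the statement is the Claim_ definition above) =====
theorem find_block_in_lines_py_spec : Claim_equal_find_block_in_lines_py := by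
  intro lines block start_from _hDom hPre
  unfold Spec_find_block_in_lines_py find_block_in_lines_py find_block_in_lines_py_alt
  unfold Pre_find_block_in_lines_py at hPre
  by_cases hb : block = []
  · rw [if_pos hb, if_pos hb]
  · rw [if_neg hb, if_neg hb]
    dsimp only
    have hbsne : block.map PySem.Str.strip ≠ [] := by
      simpa using hb
    have hlenb : (block.map PySem.Str.strip).length = block.length := List.length_map _
    rw [pv_loopA_eq_headD]
    have hmatch : ∀ l : List Int,
        (match l with | [] => (-1 : Int) | i :: _ => i) = l.headD (-1) := by
      intro l; cases l <;> rfl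
    rw [hmatch]
    have hmain : (PySem.List.pyRange start_from
          ((lines.length : Int) - (block.length : Int) + 1) 1).filter
          (pvCheckA lines (block.map PySem.Str.strip)) =
        pvRefine (lines.map PySem.Str.strip) (block.map PySem.Str.strip)
          (PySem.List.pyRange 1 ((block.map PySem.Str.strip).length : Int) 1)
          (pvCand0 (lines.map PySem.Str.strip) (block.map PySem.Str.strip) start_from) := by
      rcases hPre with h0 | hs | hge
      · exact absurd h0 hb
      · -- both lists are strictly increasing with the same members
        have pw1 : ((PySem.List.pyRange start_from
            ((lines.length : Int) - (block.length : Int) + 1) 1).filter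
            (pvCheckA lines (block.map PySem.Str.strip))).Pairwise (· < ·) :=
          List.Pairwise.filter _ (PySem.List.pairwise_lt_pyRange_one _ _)
        have pw2 : (pvRefine (lines.map PySem.Str.strip) (block.map PySem.Str.strip)
            (PySem.List.pyRange 1 ((block.map PySem.Str.strip).length : Int) 1)
            (pvCand0 (lines.map PySem.Str.strip) (block.map PySem.Str.strip)
              start_from)).Pairwise (· < ·) :=
          (pv_pairwise_cand0 _ _ _).sublist (pv_refine_sublist _ _ _ _)
        have hmem : ∀ a : Int, a ∈ (PySem.List.pyRange start_from
            ((lines.length : Int) - (block.length : Int) + 1) 1).filter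
            (pvCheckA lines (block.map PySem.Str.strip)) ↔
            a ∈ pvRefine (lines.map PySem.Str.strip) (block.map PySem.Str.strip)
              (PySem.List.pyRange 1 ((block.map PySem.Str.strip).length : Int) 1)
              (pvCand0 (lines.map PySem.Str.strip) (block.map PySem.Str.strip)
                start_from) := by
          intro a
          have h1 := pv_memA_iff lines (block.map PySem.Str.strip) start_from a hs
          rw [hlenb] at h1
          exact h1.trans
            (pv_memB_iff (lines.map PySem.Str.strip) (block.map PySem.Str.strip)
              start_from a hbsne).symm
        exact List.Perm.eq_of_pairwise
          (fun a b _ _ h1 h2 => absurd h1 (lt_asymm h2)) pw1 pw2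
          ((List.perm_ext_iff_of_nodup
            (pw1.imp fun h => ne_of_lt h) (pw2.imp fun h => ne_of_lt h)).mpr hmem)
      · -- empty range on A's side, empty candidate set on B's side
        have hA : PySem.List.pyRange start_from
            ((lines.length : Int) - (block.length : Int) + 1) 1 = [] :=
          PySem.List.pyRange_one_eq_nil (by omega)
        rw [hA, List.filter_nil]
        symm
        rw [List.eq_nil_iff_forall_not_mem]
        intro i hi
        have hc := ((pv_mem_refine _ _ _ _ _).mp hi).1
        have := (pv_mem_cand0 (lines.map PySem.Str.strip) (block.map PySem.Str.strip)
          start_from i).mp hc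
        obtain ⟨⟨k, rfl, _⟩, hge1, hle⟩ := this
        rw [hlenb, List.length_map] at hle
        omega
    rw [hmain]
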